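-- pv_equiv track=rewrite | github.com/qzhello/experience_summary_skill | scripts/validate.py | _check_anchor
-- ===== SOURCE A (Python) =====
-- def _check_anchor(anchor: str) -> bool:
--     if not anchor:
--         return False
--     parts = [p.strip() for p in anchor.split(",")]
--     if len(parts) > 3:
--         return False
--     for p in parts:
--         if ":" not in p:
--             return False
--         path_part, sym = p.split(":", 1)
--         if not path_part.strip() or not sym.strip():
--             return False
--     return True
-- ===== SOURCE B (Python) =====
-- def _check_anchor(anchor: str) -> bool:
--     # Single left-to-right scan: no split, no intermediate lists.
--     segs = 1
--     pre = colon = post = False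
--     for ch in anchor:
--         if ch == ',':
--             if not (pre and colon and post) or segs == 3:
--                 return False
--             segs += 1
--             pre = colon = post = False
--         elif not colon and ch == ':':
--             colon = True
--         elif not ch.isspace():
--             if colon:
--                 post = True
--             else:
--                 pre = True
--     return pre and colon and post
-- ===== Notes on version B (the rewrite author's own statement) =====
-- stated objective: alternative
-- what changed: Replaced split+strip+per-part split(':',1) parsing (which builds intermediate lists and strings) with a single character-by-character scan that maintains a segment count and three per-segment flags (non-ws before first colon, colon seen, non-ws after it), failing early.
import Mathlib
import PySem

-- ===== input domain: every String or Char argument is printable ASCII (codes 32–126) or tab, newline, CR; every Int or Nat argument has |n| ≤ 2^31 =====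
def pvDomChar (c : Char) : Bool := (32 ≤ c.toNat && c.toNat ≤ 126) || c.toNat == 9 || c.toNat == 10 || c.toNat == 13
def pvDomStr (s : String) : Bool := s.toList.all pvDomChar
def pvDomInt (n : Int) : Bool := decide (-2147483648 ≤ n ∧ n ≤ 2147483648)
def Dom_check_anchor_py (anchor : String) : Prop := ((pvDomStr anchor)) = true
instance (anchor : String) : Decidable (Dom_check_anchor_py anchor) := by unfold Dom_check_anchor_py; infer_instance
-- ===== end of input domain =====

-- B replaces A's split/strip/re-split parsing by a single character scan with per-segment flags (alternative decomposition, same O(n) cost).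

-- ===== PORT A =====
-- loop body of A for one (already stripped) part p
def aPartOk (p : List Char) : Bool :=
  if !(PySem.Chars.isIn [':'] p) then false
  else
    match PySem.Chars.splitOnMax p [':'] 1 with
    | [path_part, sym] => !(PySem.Chars.strip path_part).isEmpty && !(PySem.Chars.strip sym).isEmpty
    | _ => false  -- unreachable: p.split(':', 1) with ':' in p yields exactly two pieces

-- A's for-loop with its early returns
def aLoop : List (List Char) → Bool
  | [] => true
  | p :: rest => if aPartOk p then aLoop rest else false

def check_anchor_py (anchor : String) : Bool :=
  if anchor.toList.isEmpty then false
  else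
    let parts := (PySem.Chars.splitOn anchor.toList [',']).map PySem.Chars.strip
    if parts.length > 3 then false
    else aLoop parts

-- ===== PORT B =====
-- one scan step: state = none after an early `return False`, else (segs, pre, colon, post)
def bStep (st : Option (Nat × Bool × Bool × Bool)) (ch : Char) : Option (Nat × Bool × Bool × Bool) :=
  match st with
  | none => none
  | some (segs, pre, colon, post) =>
    if ch == ',' then
      if !(pre && colon && post) || segs == 3 then none
      else some (segs + 1, false, false, false)
    else if !colon && ch == ':' then some (segs, pre, true, post)
    else if !(PySem.Chars.isspace ch) then
      if colon then some (segs, pre, colon, true) else some (segs, true, colon, post)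
    else some (segs, pre, colon, post)

def check_anchor_py_alt (anchor : String) : Bool :=
  match anchor.toList.foldl bStep (some (1, false, false, false)) with
  | none => false
  | some (_, pre, colon, post) => pre && colon && post

-- ===== PRECONDITION & SPEC =====
def Spec_check_anchor_py (anchor : String) (out : Bool) : Prop := out = check_anchor_py_alt anchor
instance (anchor : String) (out : Bool) : Decidable (Spec_check_anchor_py anchor out) := by unfold Spec_check_anchor_py; infer_instance

-- ===== CLAIM (what is proved, stated in full; the proofs are below) =====
def Claim_equal_check_anchor_py : Prop := ∀ (anchor : String), Dom_check_anchor_py anchor → Spec_check_anchor_py anchor (check_anchor_py anchor)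

-- ===== LEMMAS AND PROOFS =====

-- characterisation helpers (proof-only)
def nonws (c : Char) : Bool := !PySem.Chars.isspace c
def segP (seg : List Char) : Bool := (seg.takeWhile (· != ':')).any nonws
def segC (seg : List Char) : Bool := decide (':' ∈ seg)
def segQ (seg : List Char) : Bool := ((seg.dropWhile (· != ':')).tail).any nonws
def goodSeg (seg : List Char) : Bool := segP seg && segC seg && segQ seg

-- reference splitting at commas
def mySplit : List Char → List (List Char)
  | [] => [[]]
  | c :: cs => if c = ',' then [] :: mySplit cs else (mySplit cs).modifyHead (c :: ·)

-- reference checker over the segment list, mirroring B's per-segment flags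
def chk : Nat → Bool → Bool → Bool → List (List Char) → Bool
  | _, pre, co, po, [] => pre && co && po
  | k, pre, co, po, seg :: rest =>
    let pre' := pre || (!co && segP seg)
    let co' := co || segC seg
    let po' := po || (if co then seg.any nonws else segQ seg)
    match rest with
    | [] => pre' && co' && po'
    | _ :: _ => if !(pre' && co' && po') || k == 3 then false else chk (k+1) false false false rest

def finB : Option (Nat × Bool × Bool × Bool) → Bool
  | none => false
  | some (_, p, c, q) => p && c && q

theorem mySplit_ne_nil (s : List Char) : mySplit s ≠ [] := by
  cases s with
  | nil => simp [mySplit]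
  | cons c cs =>
    simp only [mySplit]
    split
    · simp
    · intro h
      have := congrArg List.length h
      simp [List.length_modifyHead] at this
      exact mySplit_ne_nil cs this

theorem mySplit_cons_exists (s : List Char) : ∃ h t, mySplit s = h :: t := by
  cases hh : mySplit s with
  | nil => exact absurd hh (mySplit_ne_nil s)
  | cons a b => exact ⟨a, b, rfl⟩

theorem foldB_none (l : List Char) : l.foldl bStep none = none := by
  induction l with
  | nil => rfl
  | cons c cs ih => simpa [bStep] using ih

theorem singleton_infix_iff (a : Char) (l : List Char) : [a] <:+: l ↔ a ∈ l := by
  constructor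
  · rintro ⟨s, t, rfl⟩; simp
  · intro h
    obtain ⟨s, t, rfl⟩ := List.append_of_mem h
    exact ⟨s, t, by simp⟩

theorem isIn_colon (m : List Char) : PySem.Chars.isIn [':'] m = decide (':' ∈ m) := by
  by_cases h : ':' ∈ m
  · simp [h, (PySem.Chars.isIn_iff_infix [':'] m).2 ((singleton_infix_iff _ _).2 h)]
  · simp [h, (PySem.Chars.isIn_eq_false_iff [':'] m).2 (fun hin => h ((singleton_infix_iff _ _).1 hin))]

-- takeWhile/dropWhile across an append whose left part wholly satisfies / breaks the predicate
theorem takeWhile_append_all {p : Char → Bool} (w l : List Char) (h : ∀ c ∈ w, p c = true) :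
    (w ++ l).takeWhile p = w ++ l.takeWhile p := by
  induction w with
  | nil => simp
  | cons a w ih =>
    have ha := h a (by simp)
    simp [List.takeWhile_cons, ha, ih (fun c hc => h c (by simp [hc]))]

theorem dropWhile_append_all {p : Char → Bool} (w l : List Char) (h : ∀ c ∈ w, p c = true) :
    (w ++ l).dropWhile p = l.dropWhile p := by
  induction w with
  | nil => simp
  | cons a w ih =>
    have ha := h a (by simp)
    simp [List.dropWhile_cons, ha, ih (fun c hc => h c (by simp [hc]))]

theorem takeWhile_append_break {p : Char → Bool} (m l : List Char) (x : Char)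
    (hx : x ∈ m) (hpx : p x = false) : (m ++ l).takeWhile p = m.takeWhile p := by
  induction m with
  | nil => simp at hx
  | cons a m ih =>
    by_cases ha : p a = true
    · rcases List.mem_cons.mp hx with rfl | hx'
      · rw [ha] at hpx; simp at hpx
      · simp [List.takeWhile_cons, ha, ih hx']
    · simp [List.takeWhile_cons, Bool.eq_false_iff.mpr ha]

theorem dropWhile_append_break {p : Char → Bool} (m l : List Char) (x : Char)
    (hx : x ∈ m) (hpx : p x = false) : (m ++ l).dropWhile p = m.dropWhile p ++ l := by
  induction m with
  | nil => simp at hx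
  | cons a m ih =>
    by_cases ha : p a = true
    · rcases List.mem_cons.mp hx with rfl | hx'
      · rw [ha] at hpx; simp at hpx
      · simp [List.dropWhile_cons, ha, ih hx']
    · simp [List.dropWhile_cons, Bool.eq_false_iff.mpr ha]

-- splitOn with separator "," is mySplit
theorem splitOn_go_comma : ∀ (fuel : Nat) (l cur : List Char) (acc : List (List Char)),
    l.length < fuel →
    PySem.Chars.splitOn.go [','] fuel l cur acc =
      acc.reverse ++ (mySplit l).modifyHead (fun h => cur.reverse ++ h) := by
  intro fuel
  induction fuel with
  | zero => intro l cur acc h; exact absurd h (Nat.not_lt_zero _)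
  | succ fuel ih =>
    intro l cur acc h
    cases l with
    | nil => simp [PySem.Chars.splitOn.go, mySplit]
    | cons c rest =>
      by_cases hc : c = ','
      · subst hc
        have hpre : List.isPrefixOf [','] (',' :: rest) = true := by simp [List.isPrefixOf]
        rw [show PySem.Chars.splitOn.go [','] (fuel+1) (',' :: rest) cur acc
              = PySem.Chars.splitOn.go [','] fuel (List.drop 1 (',' :: rest)) [] (cur.reverse :: acc) from by
            simp [PySem.Chars.splitOn.go, hpre]]
        rw [List.drop_one, List.tail_cons, ih rest [] (cur.reverse :: acc) (by simpa using Nat.lt_of_succ_lt_succ h)]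
        obtain ⟨hh, tt, hsplit⟩ := mySplit_cons_exists rest
        simp [mySplit, hsplit, List.modifyHead]
      · have hpre : List.isPrefixOf [','] (c :: rest) = false := by
          simp [List.isPrefixOf]; exact fun e => absurd e.symm hc
        rw [show PySem.Chars.splitOn.go [','] (fuel+1) (c :: rest) cur acc
              = PySem.Chars.splitOn.go [','] fuel rest (c :: cur) acc from by
            simp [PySem.Chars.splitOn.go, hpre]]
        rw [ih rest (c :: cur) acc (by simpa using Nat.lt_of_succ_lt_succ h)]
        obtain ⟨hh, tt, hsplit⟩ := mySplit_cons_exists rest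
        simp [mySplit, hc, hsplit, List.modifyHead]

theorem modifyHead_id' (l : List (List Char)) : l.modifyHead (fun h => h) = l := by
  cases l <;> simp [List.modifyHead]

theorem splitOn_comma (s : List Char) : PySem.Chars.splitOn s [','] = mySplit s := by
  have h := splitOn_go_comma (s.length + 1) s [] [] (by omega)
  simp only [PySem.Chars.splitOn] at h ⊢
  rw [h]
  simpa using modifyHead_id' (mySplit s)

-- splitOnMax with maxsplit 0: the whole rest is one piece
theorem splitOnMax_go_zero (fuel : Nat) (l cur : List Char) (acc : List (List Char)) :
    PySem.Chars.splitOnMax.go [':'] fuel 0 l cur acc = acc.reverse ++ [cur.reverse ++ l] := by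
  cases fuel with
  | zero => simp [PySem.Chars.splitOnMax.go]
  | succ fuel =>
    cases l with
    | nil => simp [PySem.Chars.splitOnMax.go]
    | cons c rest => simp [PySem.Chars.splitOnMax.go]

-- p.split(':', 1) when ':' ∈ p
theorem splitOnMax_go_one : ∀ (fuel : Nat) (l cur : List Char) (acc : List (List Char)),
    l.length < fuel → ':' ∈ l →
    PySem.Chars.splitOnMax.go [':'] fuel 1 l cur acc =
      acc.reverse ++ [cur.reverse ++ l.takeWhile (· != ':'), (l.dropWhile (· != ':')).tail] := by
  intro fuel
  induction fuel with
  | zero => intro l cur acc h _; exact absurd h (Nat.not_lt_zero _)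
  | succ fuel ih =>
    intro l cur acc h hmem
    cases l with
    | nil => simp at hmem
    | cons c rest =>
      by_cases hc : c = ':'
      · subst hc
        have hpre : List.isPrefixOf [':'] (':' :: rest) = true := by simp [List.isPrefixOf]
        rw [show PySem.Chars.splitOnMax.go [':'] (fuel+1) 1 (':' :: rest) cur acc
              = PySem.Chars.splitOnMax.go [':'] fuel 0 (List.drop 1 (':' :: rest)) [] (cur.reverse :: acc) from by
            simp [PySem.Chars.splitOnMax.go, hpre]]
        rw [List.drop_one, List.tail_cons, splitOnMax_go_zero]
        simp [List.takeWhile_cons, List.dropWhile_cons]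
      · have hpre : List.isPrefixOf [':'] (c :: rest) = false := by
          simp [List.isPrefixOf]; exact fun e => absurd e.symm hc
        have hmem' : ':' ∈ rest := by
          rcases List.mem_cons.mp hmem with e | e
          · exact absurd e.symm hc
          · exact e
        rw [show PySem.Chars.splitOnMax.go [':'] (fuel+1) 1 (c :: rest) cur acc
              = PySem.Chars.splitOnMax.go [':'] fuel 1 rest (c :: cur) acc from by
            simp [PySem.Chars.splitOnMax.go, hpre]]
        rw [ih rest (c :: cur) acc (by simpa using Nat.lt_of_succ_lt_succ h) hmem']
        have hbne : (c != ':') = true := by simp [bne]; exact hc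
        simp [List.takeWhile_cons, List.dropWhile_cons, hbne]

theorem splitOnMax_colon (p : List Char) (h : ':' ∈ p) :
    PySem.Chars.splitOnMax p [':'] 1 = [p.takeWhile (· != ':'), (p.dropWhile (· != ':')).tail] := by
  have hh := splitOnMax_go_one (p.length + 1) p [] [] (by omega) h
  simpa [PySem.Chars.splitOnMax] using hh

-- strip decomposition: s = (all-space) ++ strip s ++ (all-space)
theorem strip_decomp (x : List Char) :
    ∃ w1 w2 : List Char, x = w1 ++ PySem.Chars.strip x ++ w2 ∧
      (∀ c ∈ w1, PySem.Chars.isspace c = true) ∧ (∀ c ∈ w2, PySem.Chars.isspace c = true) := by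
  refine ⟨x.takeWhile PySem.Chars.isspace,
          (((x.dropWhile PySem.Chars.isspace).reverse.takeWhile PySem.Chars.isspace)).reverse, ?_, ?_, ?_⟩
  · conv_lhs => rw [← List.takeWhile_append_dropWhile (p := PySem.Chars.isspace) (l := x)]
    rw [List.append_assoc]
    congr 1
    conv_lhs => rw [← List.reverse_reverse (x.dropWhile PySem.Chars.isspace)]
    conv_lhs =>
      rw [← List.takeWhile_append_dropWhile (p := PySem.Chars.isspace)
            (l := (x.dropWhile PySem.Chars.isspace).reverse)]
    rw [List.reverse_append]
    simp [PySem.Chars.strip, PySem.Chars.lstrip, PySem.Chars.rstrip]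
  · exact fun c hc => List.mem_takeWhile_imp hc
  · intro c hc
    rw [List.mem_reverse] at hc
    exact List.mem_takeWhile_imp hc

theorem strip_isEmpty (x : List Char) : (PySem.Chars.strip x).isEmpty = !x.any nonws := by
  by_cases h : x.any nonws = true
  · rw [h]
    obtain ⟨c, hcx, hcn⟩ := List.any_eq_true.mp h
    obtain ⟨w1, w2, hx, hw1, hw2⟩ := strip_decomp x
    have hcs : PySem.Chars.isspace c = false := by
      simpa [nonws] using hcn
    have hcm : c ∈ PySem.Chars.strip x := by
      rw [hx] at hcx
      rcases List.mem_append.mp hcx with h1 | h2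
      · rcases List.mem_append.mp h1 with ha | hb
        · rw [hw1 c ha] at hcs; simp at hcs
        · exact hb
      · rw [hw2 c h2] at hcs; simp at hcs
    simp [List.isEmpty_eq_false_iff, List.ne_nil_of_mem hcm]
  · have hall : ∀ c ∈ x, PySem.Chars.isspace c = true := by
      intro c hc
      by_contra hns
      exact h (List.any_eq_true.mpr ⟨c, hc, by simp [nonws, Bool.eq_false_iff.mpr hns]⟩)
    have h1 : x.dropWhile PySem.Chars.isspace = [] := List.dropWhile_eq_nil_iff.mpr hall
    rw [Bool.eq_false_iff.mpr h]
    simp [PySem.Chars.strip, PySem.Chars.lstrip, PySem.Chars.rstrip, h1]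

theorem ws_not_colon {w : List Char} (hw : ∀ c ∈ w, PySem.Chars.isspace c = true) :
    ∀ c ∈ w, (c != ':') = true := by
  intro c hc
  have := hw c hc
  simp [bne]
  intro e; subst e; simp [show PySem.Chars.isspace ':' = false from by decide] at this

-- the per-part check of A equals the flag characterisation, on the UNstripped segment
theorem aPartOk_strip (seg : List Char) : aPartOk (PySem.Chars.strip seg) = goodSeg seg := by
  obtain ⟨w1, w2, hx, hw1, hw2⟩ := strip_decomp seg
  set m := PySem.Chars.strip seg with hm
  have hnw1 : ∀ c ∈ w1, nonws c = false := fun c hc => by simp [nonws, hw1 c hc]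
  have hnw2 : ∀ c ∈ w2, nonws c = false := fun c hc => by simp [nonws, hw2 c hc]
  have hmemiff : ':' ∈ seg ↔ ':' ∈ m := by
    rw [hx]
    constructor
    · intro h
      rcases List.mem_append.mp h with h1 | h2
      · rcases List.mem_append.mp h1 with ha | hb
        · exact absurd (hw1 _ ha) (by decide)
        · exact hb
      · exact absurd (hw2 _ h2) (by decide)
    · intro h; exact List.mem_append.mpr (Or.inl (List.mem_append.mpr (Or.inr h)))
  by_cases hc : ':' ∈ seg
  · have hcm : ':' ∈ m := hmemiff.mp hc
    have hpcolon : ((':' : Char) != ':') = false := by decide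
    unfold aPartOk
    rw [isIn_colon, splitOnMax_colon m hcm]
    simp only [hcm, decide_true, Bool.not_true, Bool.false_eq_true, if_false]
    rw [strip_isEmpty, strip_isEmpty]
    have hdm : m.dropWhile (· != ':') ≠ [] := by
      intro he
      have := List.dropWhile_eq_nil_iff.mp he _ hcm
      simp at this
    -- goodSeg on the raw segment, transported to m
    have hw1any : w1.any nonws = false := by
      rw [List.any_eq_false]; intro c hc; simp [hnw1 c hc]
    have hw2any : w2.any nonws = false := by
      rw [List.any_eq_false]; intro c hc; simp [hnw2 c hc]
    have hP : segP seg = (m.takeWhile (· != ':')).any nonws := by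
      rw [segP, hx, List.append_assoc,
          takeWhile_append_all w1 _ (ws_not_colon hw1),
          takeWhile_append_break (p := fun c => c != ':') m w2 ':' hcm hpcolon]
      rw [List.any_append, hw1any]
      simp
    have hQ : segQ seg = ((m.dropWhile (· != ':')).tail).any nonws := by
      rw [segQ, hx, List.append_assoc,
          dropWhile_append_all w1 _ (ws_not_colon hw1),
          dropWhile_append_break (p := fun c => c != ':') m w2 ':' hcm hpcolon,
          List.tail_append_of_ne_nil hdm]
      rw [List.any_append, hw2any]
      simp
    have hC : segC seg = true := by simp [segC, hc]
    rw [goodSeg, hP, hQ, hC]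
    simp
  · have hcm : ':' ∉ m := fun h => hc (hmemiff.mpr h)
    unfold aPartOk
    rw [isIn_colon]
    simp [hcm, goodSeg, segC, hc]

theorem chk_nil_seg (k : Nat) (pre co po : Bool) (h : List Char) (t' : List (List Char)) :
    chk k pre co po ([] :: h :: t') =
      if !(pre && co && po) || k == 3 then false else chk (k+1) false false false (h :: t') := by
  cases co <;> cases pre <;> cases po <;> simp [chk, segP, segC, segQ]

-- B's fold equals chk over mySplit
theorem foldB_chk : ∀ (s : List Char) (k : Nat) (pre co po : Bool),
    finB (s.foldl bStep (some (k, pre, co, po))) = chk k pre co po (mySplit s) := by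
  intro s
  induction s with
  | nil =>
    intro k pre co po
    cases co <;> simp [mySplit, chk, finB, segP, segC, segQ, nonws]
  | cons c cs ih =>
    intro k pre co po
    obtain ⟨h, t, hsplit⟩ := mySplit_cons_exists cs
    by_cases hc : c = ','
    · subst hc
      have hms : mySplit (',' :: cs) = [] :: h :: t := by simp [mySplit, hsplit]
      rw [hms, List.foldl_cons]
      have hstep : bStep (some (k, pre, co, po)) ',' =
          if !(pre && co && po) || k == 3 then none else some (k + 1, false, false, false) := by
        simp [bStep]
      rw [chk_nil_seg]
      by_cases hf : (!(pre && co && po) || k == 3) = true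
      · rw [hstep, if_pos hf, if_pos hf, foldB_none]
        rfl
      · rw [hstep, if_neg hf, if_neg hf, ih, hsplit]
    · have hms : mySplit (c :: cs) = (c :: h) :: t := by
        simp [mySplit, hc, hsplit, List.modifyHead]
      rw [hms, List.foldl_cons]
      have hcb : (c == ',') = false := by simp [hc]
      by_cases h1 : (!co && (c == ':')) = true
      · have h1' : (!co) = true ∧ (c == ':') = true := by simpa using h1
        have hco : co = false := by cases co <;> simp_all
        have hcc : c = ':' := by simpa using h1'.2
        subst hcc hco
        have hstep : bStep (some (k, pre, false, po)) ':' = some (k, pre, true, po) := by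
          simp [bStep]
        rw [hstep, ih, hsplit]
        cases t <;>
          simp [chk, segP, segC, segQ, nonws, List.takeWhile_cons, List.dropWhile_cons,
                show ((':' : Char) != ':') = false from by decide,
                show PySem.Chars.isspace ':' = false from by decide]
      · by_cases h2 : PySem.Chars.isspace c = true
        · have hcc : (c == ':') = false := by
            simp; intro e; subst e; simp [show PySem.Chars.isspace ':' = false from by decide] at h2
          have hcne : (c != ':') = true := by simp [bne, hcc]
          have hstep : bStep (some (k, pre, co, po)) c = some (k, pre, co, po) := by
            simp [bStep, hcb, h1, h2]
          rw [hstep, ih, hsplit]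
          have hnwc : nonws c = false := by simp [nonws, h2]
          cases t <;> cases co <;>
            simp [chk, segP, segC, segQ, List.takeWhile_cons, List.dropWhile_cons, hcne, hnwc,
                  show (':' : Char) ≠ c from fun e => by subst e; simp_all]
        · have hnwc : nonws c = true := by simp [nonws, h2]
          cases hco : co with
          | false =>
            have hcc : (c == ':') = false := by
              cases hcb2 : (c == ':') with
              | false => rfl
              | true => exfalso; apply h1; simp [hco, hcb2]
            have hcne : (c != ':') = true := by simp [bne, hcc]
            have hstep : bStep (some (k, pre, false, po)) c = some (k, true, false, po) := by
              simp [bStep, hcb, hcc, h2]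
            rw [hstep, ih, hsplit]
            cases t <;>
              simp [chk, segP, segC, segQ, List.takeWhile_cons, List.dropWhile_cons, hcne, hnwc,
                    show (':' : Char) ≠ c from fun e => by subst e; simp_all]
          | true =>
            have hstep : bStep (some (k, pre, true, po)) c = some (k, pre, true, true) := by
              simp [bStep, hcb, h2]
            have h2' : PySem.Chars.isspace c = false := Bool.eq_false_iff.mpr h2
            rw [hstep, ih, hsplit]
            cases t <;> simp [chk, segP, segC, segQ, nonws, hnwc, h2']

-- chk from fresh flags = (≤ 3 segments) ∧ every segment good
theorem chk_fresh : ∀ (segs : List (List Char)), segs ≠ [] → ∀ k : Nat, 1 ≤ k → k ≤ 3 →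
    chk k false false false segs = (decide (k + segs.length ≤ 4) && segs.all goodSeg) := by
  intro segs
  induction segs with
  | nil => intro h; exact absurd rfl h
  | cons seg rest ih =>
    intro _ k hk1 hk3
    cases rest with
    | nil =>
      have hle : k + 1 ≤ 4 := by omega
      simp [chk, goodSeg, hle]
    | cons r rs =>
      by_cases hg : goodSeg seg = true
      · have hg' : (segP seg && segC seg && segQ seg) = true := by rwa [goodSeg] at hg
        by_cases hk : k = 3
        · subst hk
          have hlen : (decide (3 + (seg :: r :: rs).length ≤ 4)) = false := by
            rw [decide_eq_false_iff_not, List.length_cons, List.length_cons]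
            omega
          rw [hlen]
          simp [chk, hg']
        · have hkk : (k == 3) = false := by simp [hk]
          have h1 : 1 ≤ k + 1 := by omega
          have h3 : k + 1 ≤ 3 := by omega
          rw [show chk k false false false (seg :: r :: rs)
                = chk (k+1) false false false (r :: rs) from by simp [chk, hg', hkk]]
          rw [ih (by simp) (k+1) h1 h3]
          simp only [List.all_cons, hg, Bool.true_and, List.length_cons]
          congr 1
          rw [decide_eq_decide]
          omega
      · have hgf : goodSeg seg = false := Bool.eq_false_iff.mpr hg
        have hg' : (segP seg && segC seg && segQ seg) = false := by rwa [goodSeg] at hgf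
        simp [chk, hg', List.all_cons, hgf]

theorem aLoop_all (ps : List (List Char)) : aLoop ps = ps.all aPartOk := by
  induction ps with
  | nil => rfl
  | cons p rest ih => by_cases h : aPartOk p <;> simp [aLoop, h, ih]

theorem alt_eq (s : List Char) :
    (match s.foldl bStep (some (1, false, false, false)) with
      | none => false
      | some (_, pre, colon, post) => pre && colon && post) =
    (decide (1 + (mySplit s).length ≤ 4) && (mySplit s).all goodSeg) := by
  have h1 : finB (s.foldl bStep (some (1, false, false, false))) = chk 1 false false false (mySplit s) :=
    foldB_chk s 1 false false false
  have h2 := chk_fresh (mySplit s) (mySplit_ne_nil s) 1 (by omega) (by omega)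
  rw [h2] at h1
  exact h1

-- ===== VERDICT (by name: the statement is the Claim_ definition above) =====
theorem check_anchor_py_spec : Claim_equal_check_anchor_py := by
  intro anchor _
  unfold Spec_check_anchor_py check_anchor_py check_anchor_py_alt
  rw [alt_eq]
  by_cases hnil : anchor.toList.isEmpty = true
  · -- empty string: A returns false; B's scan ends with all flags false
    rw [List.isEmpty_iff] at hnil
    simp [hnil, mySplit, goodSeg, segP, segC, segQ]
  · simp only [hnil, if_neg, Bool.false_eq_true, not_false_eq_true, if_false]
    rw [splitOn_comma]
    have hmap : ((mySplit anchor.toList).map PySem.Chars.strip).length = (mySplit anchor.toList).length := by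
      simp
    rw [aLoop_all, List.all_map]
    have hfun : (fun seg => aPartOk (PySem.Chars.strip seg)) = goodSeg := funext aPartOk_strip
    simp only [Function.comp_def, hfun, hmap]
    by_cases hlen : (mySplit anchor.toList).length > 3
    · have : ¬ (1 + (mySplit anchor.toList).length ≤ 4) := by omega
      simp [hlen, this]
    · have : 1 + (mySplit anchor.toList).length ≤ 4 := by omega
      simp [hlen, this]
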